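/-
  THE PINNED STATEMENTS of the jsmn headlines (`JsmnOnX86.jsmn_on_valid_json`, `jsmn_always_halts`, `jsmn_strict_on_valid_json`,
  `jsmn_strict_rejects_bare_primitive`, `jsmn_strict_always_halts`: Prog/Jsmn/Statement.lean).

  WHAT THIS FILE IS FOR. Prog/Jsmn/Statement.lean imports the proof before it states the theorems, inside `namespace JsmnOnX86 … open OnX86`:
  a declaration, instance, notation or macro anywhere under the proof could change what the statements there MEAN, and an edit that weakens
  one passes every other gate. This file states the same propositions with nothing of the proof in scope: it imports only the model
  (lean.v3: `OnX86.exec`, `X86.MicroOK`, the byte-list pieces of X86/Derived/Prog/ImageFile.lean), the two generated byte lists, and the pure JSON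
  vocabulary of the statement (Json/Grammar.lean = RFC 8259; Json/Jsmn/Model.lean, Encode.lean, Expected.lean = jsmn's tokens and their bytes; Lean core only),
  writes every name in full, opens nothing, and declares the programs again from the same right-hand sides (down to the memory file:
  `X86.J6.Start.jsmnImage`, which lives in a proof module, is declared again here). Pinned/Check.lean and Pinned/CheckEnv.lean (run by
  tools/v3/pins_gate.sh) accept only if each proved theorem's type IS the proposition pinned here.

  THE RULE. This file is changed only when the OWNER changes a statement. Its checksum is in PINNED.sha256; a proof never needs to touch it.
  It may import: the model (X86.*, Interp.*, …), Lean core, and the modules named below. Nothing that proves anything about a program.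
-/
import X86.Derived.Prog.Harness
import X86.Derived.Prog.Reach
import X86.Derived.Prog.ImageFile
import Prog.Jsmn.JsmnDBytes
import Prog.Jsmn.JsmnSBytes
import Json.Grammar
import Json.Jsmn.Model
import Json.Jsmn.Encode
import Json.Jsmn.Expected

/-! ### The memory file (= `X86.J6.Start.jsmnImage b js N` with `image = b.image`, Prog/Jsmn/StartInst.lean) -/

def Pinned.Jsmn.jsmnParamBytes (len N : Nat) : List UInt8 :=
  X86.ImageFile.le64 0x200000 ++ (X86.ImageFile.le64 (UInt64.ofNat len) ++ (X86.ImageFile.le64 0x400000 ++ (X86.ImageFile.le64 (UInt64.ofNat N) ++ X86.ImageFile.zeros 40)))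

def Pinned.Jsmn.jsmnImageBytes (image : List UInt8) (js : List UInt8) (N : Nat) : List UInt8 :=
  image ++ (X86.ImageFile.zeros (0xFF000 - image.length) ++ (Pinned.Jsmn.jsmnParamBytes js.length N ++ (X86.ImageFile.zeros (0x1000 - 72) ++ js)))

def Pinned.Jsmn.jsmnImage (image : List UInt8) (js : List UInt8) (N : Nat) : ByteArray := ⟨(Pinned.Jsmn.jsmnImageBytes image js N).toArray⟩

/-! ### The programs and the vocabulary (= `JsmnOnX86.jsmnProgram`, `jsmnProgramStrict`, `JsonText`, `tokensOf`, `encode`, `Fits`) -/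

/-- jsmn_d.bin (default configuration) and its stub: `jsmn_main(js = 200000H, len, out = 400000H, num_tokens = 3F000H)`. -/
def Pinned.Jsmn.jsmnProgram : OnX86.Program := ⟨fun s => Pinned.Jsmn.jsmnImage JsmnDBytes.image_bytes s 0x3F000, 0x100000, 0x800000⟩

/-- jsmn_s.bin (-DJSMN_STRICT -DJSMN_PARENT_LINKS) and its stub: `num_tokens = 32000H`. -/
def Pinned.Jsmn.jsmnProgramStrict : OnX86.Program := ⟨fun s => Pinned.Jsmn.jsmnImage JsmnSBytes.image_bytes s 0x32000, 0x100000, 0x800000⟩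

/-- `s` is a JSON text (RFC 8259 §2: ws value ws): the rendering of the well-formed tree `t` between the whitespace `w1` and `w2`. -/
structure Pinned.Jsmn.JsonText (s w1 : List UInt8) (t : Json.Layout) (w2 : List UInt8) : Prop where
  text : s = w1 ++ Json.Layout.text t ++ w2
  lead : Json.IsWs w1
  tree : Json.Layout.WellFormed t
  trail : Json.IsWs w2

/-- The tokens jsmn should produce for the tree `t` rendered behind `w1`: one per node, in pre-order. -/
def Pinned.Jsmn.tokensOf (w1 : List UInt8) (t : Json.Layout) : List Jsmn.Token := Json.Layout.tokens t w1.length 0 (-1)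

/-- jsmn_main's output for a successful parse: the number of tokens (4 bytes, little-endian), then the tokens. -/
def Pinned.Jsmn.encode (cfg : Jsmn.Config) (ts : List Jsmn.Token) : List UInt8 := Jsmn.le32 ts.length ++ ts.flatMap (Jsmn.Token.bytes cfg)

/-- The input fits the harness's buffer. -/
def Pinned.Jsmn.Fits (s : List UInt8) : Prop := s.length ≤ 0x1FF000

/-! ### The headlines -/

/-- What `JsmnOnX86.jsmn_on_valid_json` must prove, exactly. -/
def Pinned.Jsmn.jsmn_on_valid_json : Prop :=
  ∀ (μ : X86.Microarch), X86.MicroOK μ → ∀ (ub : Nat → Bool) (s w1 : List UInt8) (t : Json.Layout) (w2 : List UInt8),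
    Pinned.Jsmn.JsonText s w1 t w2 → Pinned.Jsmn.Fits s → Json.Layout.count t ≤ 0x3F000 →
    OnX86.exec μ Pinned.Jsmn.jsmnProgram ub s = some (Pinned.Jsmn.encode Jsmn.Config.default (Pinned.Jsmn.tokensOf w1 t))

/-- What `JsmnOnX86.jsmn_always_halts` must prove, exactly. -/
def Pinned.Jsmn.jsmn_always_halts : Prop :=
  ∀ (μ : X86.Microarch), X86.MicroOK μ → ∀ (ub : Nat → Bool) (s : List UInt8), Pinned.Jsmn.Fits s →
    ∃ out, OnX86.exec μ Pinned.Jsmn.jsmnProgram ub s = some out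

/-- What `JsmnOnX86.jsmn_strict_on_valid_json` must prove, exactly. -/
def Pinned.Jsmn.jsmn_strict_on_valid_json : Prop :=
  ∀ (μ : X86.Microarch), X86.MicroOK μ → ∀ (ub : Nat → Bool) (s w1 : List UInt8) (t : Json.Layout) (w2 : List UInt8),
    Pinned.Jsmn.JsonText s w1 t w2 → (Json.Layout.isPrimitive t = true → w2 ≠ []) → Pinned.Jsmn.Fits s → Json.Layout.count t ≤ 0x32000 →
    OnX86.exec μ Pinned.Jsmn.jsmnProgramStrict ub s = some (Pinned.Jsmn.encode Jsmn.Config.strictLinks (Pinned.Jsmn.tokensOf w1 t))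

/-- What `JsmnOnX86.jsmn_strict_rejects_bare_primitive` must prove, exactly. -/
def Pinned.Jsmn.jsmn_strict_rejects_bare_primitive : Prop :=
  ∀ (μ : X86.Microarch), X86.MicroOK μ → ∀ (ub : Nat → Bool) (s w1 : List UInt8) (t : Json.Layout),
    Pinned.Jsmn.JsonText s w1 t [] → Json.Layout.isPrimitive t = true → Pinned.Jsmn.Fits s →
    OnX86.exec μ Pinned.Jsmn.jsmnProgramStrict ub s = some (Jsmn.le32 (-3))

/-- What `JsmnOnX86.jsmn_strict_always_halts` must prove, exactly. -/
def Pinned.Jsmn.jsmn_strict_always_halts : Prop :=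
  ∀ (μ : X86.Microarch), X86.MicroOK μ → ∀ (ub : Nat → Bool) (s : List UInt8), Pinned.Jsmn.Fits s →
    ∃ out, OnX86.exec μ Pinned.Jsmn.jsmnProgramStrict ub s = some out
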